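-- pv_equiv track=rewrite | github.com/devonhollowood/adventofcode | 2018/day02.py | part1
-- ===== SOURCE A (Python) =====
-- import collections
--
-- def part1(puzzle):
--     doublets = 0
--     triplets = 0
--     for line in puzzle:
--         counts = dict(collections.Counter(line)).values()
--         if 2 in counts:
--             doublets += 1
--         if 3 in counts:
--             triplets += 1
--     return doublets * triplets
-- ===== SOURCE B (Python) =====
-- def _run_lengths(s):
--     # s is a sorted list of characters; return the length of each maximal run
--     lens = []
--     while s:
--         c = s[0]
--         k = 1
--         while k < len(s) and s[k] == c:
--             k += 1
--         lens.append(k)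
--         s = s[k:]
--     return lens
--
--
-- def part1(puzzle):
--     doublets = 0
--     triplets = 0
--     for line in puzzle:
--         lens = set(_run_lengths(sorted(line)))
--         if 2 in lens:
--             doublets += 1
--         if 3 in lens:
--             triplets += 1
--     return doublets * triplets
-- ===== Notes on version B (the rewrite author's own statement) =====
-- stated objective: alternative
-- what changed: replaces the per-line Counter hash-frequency table with sort-then-run-length: each line's characters are sorted and a run-length scan collects the distinct run lengths into a set, membership of 2 and 3 in that set replacing membership in the Counter's values
import Mathlib
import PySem

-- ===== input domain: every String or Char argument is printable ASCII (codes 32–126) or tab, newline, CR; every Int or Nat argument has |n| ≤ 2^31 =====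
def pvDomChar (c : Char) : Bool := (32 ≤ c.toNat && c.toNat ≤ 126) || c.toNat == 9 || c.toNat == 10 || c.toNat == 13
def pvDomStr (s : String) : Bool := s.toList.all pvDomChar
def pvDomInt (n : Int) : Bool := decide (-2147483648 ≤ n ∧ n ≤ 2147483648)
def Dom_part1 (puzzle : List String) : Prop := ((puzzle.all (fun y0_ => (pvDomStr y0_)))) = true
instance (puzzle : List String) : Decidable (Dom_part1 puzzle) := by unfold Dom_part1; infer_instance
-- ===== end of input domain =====

-- B replaces A's per-line Counter frequency table with sort + run-length scan (alternative algorithm, same result).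

-- ===== PORT A =====
def part1 (puzzle : List String) : Int :=
  let r := puzzle.foldl (fun (acc : Int × Int) line =>
    let counts := (PySem.Dict.counter line.toList).values
    ((if counts.contains 2 then acc.1 + 1 else acc.1),
     (if counts.contains 3 then acc.2 + 1 else acc.2))) (0, 0)
  r.1 * r.2

-- ===== PORT B =====
-- port of Source B's _run_lengths: the inner while counts the leading run (k), then s = s[k:]
def runLengths (s : List Char) : List Nat :=
  match s with
  | [] => []
  | c :: rest =>
    let run := rest.takeWhile (fun x => x == c)
    (run.length + 1) :: runLengths (rest.drop run.length)
termination_by s.length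
decreasing_by
  simp only [List.length_drop, List.length_cons]
  omega

def part1_alt (puzzle : List String) : Int :=
  let r := puzzle.foldl (fun (acc : Int × Int) line =>
    let lens := PySem.Set.ofList (runLengths (PySem.List.sorted line.toList (fun c => c) false))
    ((if lens.contains 2 then acc.1 + 1 else acc.1),
     (if lens.contains 3 then acc.2 + 1 else acc.2))) (0, 0)
  r.1 * r.2

-- ===== PRECONDITION & SPEC =====
def Spec_part1 (puzzle : List String) (out : Int) : Prop := out = part1_alt puzzle
instance (puzzle : List String) (out : Int) : Decidable (Spec_part1 puzzle out) := by unfold Spec_part1; infer_instance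

-- ===== CLAIM (what is proved, stated in full; the proofs are below) =====
def Claim_equal_part1 : Prop := ∀ (puzzle : List String), Dom_part1 puzzle → Spec_part1 puzzle (part1 puzzle)

-- ===== LEMMAS AND PROOFS =====

theorem drop_takeWhile_length (rest : List Char) (p : Char → Bool) :
    rest.drop (rest.takeWhile p).length = rest.dropWhile p := by
  set n := (rest.takeWhile p).length with hn
  conv_lhs => rw [← List.takeWhile_append_dropWhile (p := p) (l := rest)]
  exact List.drop_left' hn.symm

-- on a sorted list the run lengths are exactly the multiplicities of its members
theorem mem_runLengths (cs : List Char) (hs : cs.Pairwise (· ≤ ·)) (k : Nat) :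
    k ∈ runLengths cs ↔ ∃ c ∈ cs, cs.count c = k := by
  induction cs using runLengths.induct with
  | case1 => simp [runLengths]
  | case2 c rest run ih =>
    obtain ⟨tail, htail⟩ : ∃ t, List.dropWhile (fun x => x == c) rest = t := ⟨_, rfl⟩
    have hdrop : rest.drop run.length = tail := by
      rw [drop_takeWhile_length, htail]
    have hsplit : run ++ tail = rest := by
      rw [← htail]; exact List.takeWhile_append_dropWhile
    have hrun : ∀ x ∈ run, x = c := by
      intro x hx
      simpa using List.mem_takeWhile_imp hx
    obtain ⟨hcle, hrest⟩ := List.pairwise_cons.mp hs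
    have htp : tail.Pairwise (· ≤ ·) := by
      rw [← htail]; exact hrest.sublist (List.dropWhile_sublist _)
    have htr : ∀ x ∈ tail, x ∈ rest := by
      intro x hx
      rw [← htail] at hx
      exact (List.dropWhile_sublist _).mem hx
    have hnot : ∀ x ∈ tail, x ≠ c := by
      cases h0 : tail with
      | nil => simp
      | cons t ts =>
        have hne : rest.dropWhile (fun x => x == c) ≠ [] := by rw [htail, h0]; simp
        have ht := List.head_dropWhile_not (fun x => x == c) hne
        have htc : t ≠ c := by
          have : (t == c) = false := by simpa [htail, h0] using ht
          simpa using this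
        have hct : c < t :=
          lt_of_le_of_ne (hcle t (htr t (by rw [h0]; simp))) (Ne.symm htc)
        intro x hx
        rcases List.mem_cons.mp hx with rfl | hx'
        · exact htc
        · have htx : t ≤ x := (List.pairwise_cons.mp (h0 ▸ htp)).1 x hx'
          exact fun hxc => absurd (hxc ▸ htx) (not_le.mpr hct)
    have hcount_c : (c :: rest).count c = run.length + 1 := by
      rw [List.count_cons_self, ← hsplit, List.count_append]
      have h1 : run.count c = run.length :=
        List.count_eq_length.mpr (fun b hb => ((hrun b hb).symm ▸ rfl))
      have h2 : tail.count c = 0 := List.count_eq_zero.mpr (fun hc => hnot c hc rfl)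
      omega
    have hcount_d : ∀ d, d ≠ c → (c :: rest).count d = tail.count d := by
      intro d hd
      have h0 : run.count d = 0 := List.count_eq_zero.mpr (fun hdr => hd (hrun d hdr))
      have : rest.count d = tail.count d := by rw [← hsplit, List.count_append]; omega
      simp [this, Ne.symm hd]
    rw [hdrop] at ih
    have hunfold : runLengths (c :: rest) = (run.length + 1) :: runLengths tail := by
      rw [runLengths, drop_takeWhile_length, htail]
    rw [hunfold, List.mem_cons, ih htp]
    simp only [List.mem_cons]
    constructor
    · rintro (rfl | ⟨d, hd, hdk⟩)
      · exact ⟨c, Or.inl rfl, hcount_c⟩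
      · exact ⟨d, Or.inr (htr d hd), (hcount_d d (hnot d hd)).symm ▸ hdk⟩
    · rintro ⟨d, hd | hd, hdk⟩
      · subst hd
        rw [hcount_c] at hdk
        exact Or.inl hdk.symm
      · by_cases hdc : d = c
        · subst hdc
          rw [hcount_c] at hdk
          exact Or.inl hdk.symm
        · have hdt : d ∈ tail := by
            rcases List.mem_append.mp (hsplit ▸ hd) with h | h
            · exact absurd (hrun d h) hdc
            · exact h
          refine Or.inr ⟨d, hdt, ?_⟩
          rw [← hcount_d d hdc]
          exact hdk

-- per-line agreement of the two membership tests
theorem contains_eq (line : String) (n : Nat) :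
    ((PySem.Dict.counter line.toList).values).contains ((n : Nat) : Int)
      = (PySem.Set.ofList (runLengths (PySem.List.sorted line.toList (fun c => c) false))).contains n := by
  have hperm : (PySem.List.sorted line.toList (fun c => c) false).Perm line.toList :=
    PySem.List.sorted_perm line.toList (fun c => c) false
  have hpair : (PySem.List.sorted line.toList (fun c => c) false).Pairwise (· ≤ ·) := by
    simpa using PySem.List.sorted_pairwise (xs := line.toList) (key := fun c => c)
  rw [Bool.eq_iff_iff, List.contains_iff_mem, PySem.Set.contains_iff,
    PySem.Set.mem_ofList, mem_runLengths _ hpair n]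
  simp only [PySem.Dict.values, PySem.Dict.items_counter, List.map_map, List.mem_map,
    Function.comp]
  constructor
  · rintro ⟨c, hc, hcn⟩
    refine ⟨c, hperm.mem_iff.mpr ((PySem.Set.mem_ofList _ _).mp hc), ?_⟩
    rw [hperm.count_eq]
    exact_mod_cast hcn
  · rintro ⟨c, hc, hcn⟩
    refine ⟨c, (PySem.Set.mem_ofList _ _).mpr (hperm.mem_iff.mp hc), ?_⟩
    rw [hperm.count_eq] at hcn
    exact_mod_cast congrArg (Nat.cast (R := Int)) hcn

-- ===== VERDICT (by name: the statement is the Claim_ definition above) =====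
theorem part1_spec : Claim_equal_part1 := by
  intro puzzle _
  unfold Spec_part1 part1 part1_alt
  have h2 : ∀ line : String, ((PySem.Dict.counter line.toList).values).contains 2
      = (PySem.Set.ofList (runLengths (PySem.List.sorted line.toList (fun c => c) false))).contains 2 :=
    fun line => contains_eq line 2
  have h3 : ∀ line : String, ((PySem.Dict.counter line.toList).values).contains 3
      = (PySem.Set.ofList (runLengths (PySem.List.sorted line.toList (fun c => c) false))).contains 3 :=
    fun line => contains_eq line 3
  simp only [h2, h3]
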